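-- pv_equiv track=rewrite | github.com/abdbbdii/prize-bond-finder | abdQOL.py | clean_csv_by_col_dict
-- ===== SOURCE A (Python) =====
-- def clean_csv_by_col_dict(data_list):
--     # Extract column names
--     column_names = list(data_list[0].keys()) if data_list else []
--     cleaned_columns = {col: [] for col in column_names}
--     # Clean the CSV data
--     for row in data_list:
--         for col in column_names:
--             cell = row[col]
--             if str(cell).strip():
--                 cleaned_columns[col].append(cell)
--     # Determine the maximum length among cleaned columns
--     max_length = max(len(column) for column in cleaned_columns.values())
--     # Pad shorter columns with empty strings to match the maximum length
--     cleaned_columns = {col: column + [""] * (max_length - len(column)) for col, column in cleaned_columns.items()}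
--     # Transpose
--     return [dict(zip(cleaned_columns.keys(), values)) for values in zip(*cleaned_columns.values())]
-- ===== SOURCE B (Python) =====
-- def clean_csv_by_col_dict(data_list):
--     # Single scatter pass: per-column write pointers into directly-built output rows
--     # (no per-column lists, no padding pass, no zip-transpose).
--     if not data_list:
--         return []
--     column_names = list(data_list[0].keys())
--     rows = []
--     counts = {c: 0 for c in column_names}
--     for row in data_list:
--         for c in column_names:
--             cell = row[c]
--             if str(cell).strip():
--                 i = counts[c]
--                 if i == len(rows):
--                     rows.append({k: "" for k in column_names})
--                 rows[i][c] = cell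
--                 counts[c] = i + 1
--     return rows
-- ===== Notes on version B (the rewrite author's own statement) =====
-- stated objective: alternative
-- what changed: A gathers non-blank cells into per-column lists, pads every column to the max length and transposes with zip(*); B makes one scatter pass keeping a write pointer per column, placing each non-blank cell directly into the output row it belongs to and appending a fresh blank row whenever a column outgrows the rows built so far - no column lists, no padding pass, no transpose.
import Mathlib
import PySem

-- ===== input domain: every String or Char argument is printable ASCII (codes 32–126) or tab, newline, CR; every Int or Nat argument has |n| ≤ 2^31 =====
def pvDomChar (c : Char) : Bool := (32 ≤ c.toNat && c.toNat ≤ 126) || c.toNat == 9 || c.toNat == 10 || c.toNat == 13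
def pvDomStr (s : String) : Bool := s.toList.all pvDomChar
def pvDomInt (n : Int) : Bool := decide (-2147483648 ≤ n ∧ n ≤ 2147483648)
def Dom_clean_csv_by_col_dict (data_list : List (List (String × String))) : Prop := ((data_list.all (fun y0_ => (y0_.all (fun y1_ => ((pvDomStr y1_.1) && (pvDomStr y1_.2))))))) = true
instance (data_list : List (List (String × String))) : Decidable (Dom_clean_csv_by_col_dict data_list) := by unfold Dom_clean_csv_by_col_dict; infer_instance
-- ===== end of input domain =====

-- B replaces A's gather-pad-transpose (per-column lists, '' padding, zip(*)) by a single scatter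
-- pass: per-column write pointers place each non-blank cell directly into the output row it belongs
-- to, appending a blank row when a column outgrows the rows built so far (objective: alternative).
-- Return-value equivalence only; neither program mutates its argument.

-- ===== PORT A =====
-- row[col] (Python dict lookup, first match; Pre_ guarantees the key is present — Python raises KeyError otherwise)
def pvCell (row : List (String × String)) (c : String) : String :=
  ((PySem.Dict.mk row).get? c).getD ""

-- body of A's inner loop: `if str(cell).strip(): cleaned_columns[col].append(cell)`
def pvStep (row : List (String × String)) (d : PySem.Dict String (List String)) (c : String) :
    PySem.Dict String (List String) :=
  let cell := pvCell row c
  if PySem.Str.strip cell ≠ "" then d.modify c [] (fun l => l ++ [cell]) else d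

-- zip(*cols): one tuple per step until exhaustion; A applies it to columns all padded to length n,
-- so counting exactly n head/tail steps is zip's exact behaviour there
def pvMultiZip : Nat → List (List String) → List (List String)
  | 0, _ => []
  | n+1, cols => cols.map (fun l => l.headD "") :: pvMultiZip n (cols.map List.tail)

-- max(seq) for a nonempty list; the [] case is unreachable under Pre_ (Python raises ValueError)
def pvMaxHead (l : List Nat) : Nat :=
  match l with | [] => 0 | x :: xs => xs.foldl max x

def clean_csv_by_col_dict (data_list : List (List (String × String))) : List (List (String × String)) :=
  let column_names := (data_list.headD []).map Prod.fst
  let init : PySem.Dict String (List String) :=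
    column_names.foldl (fun d c => d.insert c []) PySem.Dict.empty
  let cleaned := data_list.foldl (fun d row => column_names.foldl (fun d c => pvStep row d c) d) init
  let lens := cleaned.values.map List.length
  -- max() of an empty sequence raises ValueError in Python: outside Pre_
  let max_length := pvMaxHead lens
  let padded := cleaned.items.map (fun p => (p.1, p.2 ++ List.replicate (max_length - p.2.length) ""))
  (pvMultiZip max_length (padded.map Prod.snd)).map (fun vs => (padded.map Prod.fst).zip vs)

-- ===== PORT B =====
-- the fresh blank row  {k: "" for k in column_names}
def pvBlank (names : List String) : List (String × String) := names.map (fun k => (k, ""))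

-- body of Source B's inner loop on column c with its cell: possibly append a blank row, then
-- rows[i][c] = cell (dict assignment on the row at index i) and counts[c] = i + 1
def pvStepB (names : List String)
    (st : List (List (String × String)) × PySem.Dict String Nat) (c cell : String) :
    List (List (String × String)) × PySem.Dict String Nat :=
  if PySem.Str.strip cell ≠ "" then
    let i := st.2.getD c 0
    let rows := if i = st.1.length then st.1 ++ [pvBlank names] else st.1
    (rows.set i (((PySem.Dict.mk (rows.getD i [])).insert c cell).items), st.2.insert c (i + 1))
  else st

def clean_csv_by_col_dict_alt (data_list : List (List (String × String))) : List (List (String × String)) :=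
  match data_list with
  | [] => []
  | r0 :: _ =>
    let column_names := r0.map Prod.fst
    let counts0 : PySem.Dict String Nat :=
      column_names.foldl (fun d c => d.insert c 0) PySem.Dict.empty
    let st := data_list.foldl
      (fun st row => column_names.foldl (fun st c => pvStepB column_names st c (pvCell row c)) st)
      ([], counts0)
    st.1

-- ===== PRECONDITION & SPEC =====
-- Pre_ excludes exactly: empty data_list and an empty first row (A's max() raises ValueError there),
-- rows missing one of the first row's columns (row[col] raises KeyError), and rows whose association
-- list repeats a key — such a list does not represent any Python dict, so nothing is claimed about it.
def Pre_clean_csv_by_col_dict (data_list : List (List (String × String))) : Prop :=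
  data_list ≠ [] ∧ data_list.headD [] ≠ [] ∧
    ∀ row ∈ data_list, (row.map Prod.fst).Nodup ∧
      ∀ c ∈ (data_list.headD []).map Prod.fst, c ∈ row.map Prod.fst
instance (data_list : List (List (String × String))) : Decidable (Pre_clean_csv_by_col_dict data_list) := by
  unfold Pre_clean_csv_by_col_dict; infer_instance

def pvWitness_clean_csv_by_col_dict : (List (List (String × String))) :=
  [[("a", "1"), ("b", "")], [("a", " "), ("b", "2")]]

def Spec_clean_csv_by_col_dict (data_list : List (List (String × String))) (out : List (List (String × String))) : Prop := out = clean_csv_by_col_dict_alt data_list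
instance (data_list : List (List (String × String))) (out : List (List (String × String))) : Decidable (Spec_clean_csv_by_col_dict data_list out) := by unfold Spec_clean_csv_by_col_dict; infer_instance

-- ===== CLAIM (what is proved, stated in full; the proofs are below) =====
def Claim_equal_clean_csv_by_col_dict : Prop := ∀ (data_list : List (List (String × String))), Dom_clean_csv_by_col_dict data_list → Pre_clean_csv_by_col_dict data_list → Spec_clean_csv_by_col_dict data_list (clean_csv_by_col_dict data_list)

-- ===== LEMMAS AND PROOFS =====

-- the cleaned column of c (what A's append loop accumulates, and what B's pointer counts[c] tracks)
def pvColF (dl : List (List (String × String))) (c : String) : List String :=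
  dl.filterMap (fun row =>
    if PySem.Str.strip (pvCell row c) ≠ "" then some (pvCell row c) else none)

-- the cell contributed by one row to column c (empty if blank)
def pvCellList (row : List (String × String)) (c : String) : List String :=
  if PySem.Str.strip (pvCell row c) ≠ "" then [pvCell row c] else []

-- max of the cleaned-column lengths (the number of rows built so far)
def pvMx (names : List String) (g : String → List String) : Nat :=
  (names.map (fun c => (g c).length)).foldl max 0

-- B's loop state, expressed through the per-column history g
def pvRows (names : List String) (g : String → List String) : List (List (String × String)) :=
  (List.range (pvMx names g)).map (fun i => names.map (fun c => (c, (g c).getD i "")))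
def pvCounts (names : List String) (g : String → List String) : PySem.Dict String Nat :=
  PySem.Dict.mk (names.map (fun c => (c, (g c).length)))

-- one event's effect on the history
def pvUpd (g : String → List String) (c cell : String) : String → List String :=
  fun c' => if c' = c ∧ PySem.Str.strip cell ≠ "" then g c ++ [cell] else g c'

theorem pvColF_cons (row : List (String × String)) (dl : List (List (String × String))) (c : String) :
    pvColF (row :: dl) c = pvCellList row c ++ pvColF dl c := by
  by_cases h : PySem.Str.strip (pvCell row c) = ""
  · simp [pvColF, pvCellList, h]
  · simp [pvColF, pvCellList, h]

-- replace-nothing: map over pairs whose keys all differ from c is the identity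
theorem pvReplaceId {ν : Type} (l : List (String × ν)) (c : String) (v : ν)
    (h : c ∉ l.map Prod.fst) :
    l.map (fun p => if p.1 == c then (c, v) else p) = l := by
  induction l with
  | nil => rfl
  | cons p t ih =>
    have hp : (p.1 == c) = false := by
      simpa using fun he : p.1 = c => h (by simp [he])
    have ht : c ∉ t.map Prod.fst := fun hm => h (by simp [hm])
    rw [List.map_cons, hp, ih ht]
    simp

theorem pvInitItems {ν : Type} (names : List String) (v : ν) (hnd : names.Nodup) :
    (names.foldl (fun d c => d.insert c v) PySem.Dict.empty).items
      = names.map (fun c => (c, v)) := by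
  have := PySem.Dict.items_foldl_insert_fresh (l := names) (k := id) (v := fun _ => v)
    (d := PySem.Dict.empty) (by intro a _; simp) (by simpa using hnd)
  simpa using this

theorem pvStepItems (row : List (String × String)) (names : List String)
    (pre : List (String × List String)) (g : String → List String)
    (hdis : ∀ c ∈ names, c ∉ pre.map Prod.fst) (hpre : (pre.map Prod.fst).Nodup) (hnd : names.Nodup) :
    (names.foldl (fun d c => pvStep row d c)
        (PySem.Dict.mk (pre ++ names.map (fun c => (c, g c))))).items
      = pre ++ names.map (fun c => (c, g c ++ pvCellList row c)) := by
  induction names generalizing pre with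
  | nil => simp
  | cons c rest ih =>
    have hnotpre : c ∉ pre.map Prod.fst := hdis c (by simp)
    have hnotrest : c ∉ rest := (List.nodup_cons.mp hnd).1
    have hrest_nd : rest.Nodup := (List.nodup_cons.mp hnd).2
    have hkeys : (PySem.Dict.mk (pre ++ (c, g c) :: rest.map (fun c' => (c', g c')))).keys
        = pre.map Prod.fst ++ c :: rest := by
      simp [PySem.Dict.keys, Function.comp_def]
    have hknd : (PySem.Dict.mk (pre ++ (c, g c) :: rest.map (fun c' => (c', g c')))).keys.Nodup := by
      rw [hkeys, List.nodup_append]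
      refine ⟨hpre, hnd, ?_⟩
      intro a ha b hb he
      exact hdis b hb (he ▸ ha)
    have hstep : pvStep row (PySem.Dict.mk (pre ++ (c, g c) :: rest.map (fun c' => (c', g c')))) c
        = PySem.Dict.mk ((pre ++ [(c, g c ++ pvCellList row c)]) ++ rest.map (fun c' => (c', g c'))) := by
      by_cases hs : PySem.Str.strip (pvCell row c) = ""
      · simp [pvStep, hs, pvCellList]
      · have hcont : (PySem.Dict.mk (pre ++ (c, g c) :: rest.map (fun c' => (c', g c')))).contains c = true := by
          rw [PySem.Dict.contains_eq_decide_mem_keys, hkeys]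
          simp
        have hget : (PySem.Dict.mk (pre ++ (c, g c) :: rest.map (fun c' => (c', g c')))).getD c []
            = g c :=
          PySem.Dict.getD_of_mem_items _ (by simp) hknd []
        apply PySem.Dict.ext
        simp only [pvStep, hs, ne_eq, not_false_iff, if_pos, PySem.Dict.modify, hget]
        rw [PySem.Dict.items_insert_of_contains _ _ hcont]
        simp only [List.map_append, List.map_cons, beq_self_eq_true, if_pos]
        rw [pvReplaceId pre c _ hnotpre,
          pvReplaceId (rest.map (fun c' => (c', g c'))) c _ (by simpa using hnotrest)]
        simp [pvCellList, hs]
    rw [List.map_cons, List.foldl_cons, hstep,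
      ih (pre ++ [(c, g c ++ pvCellList row c)])
        (by
          intro c' hc' hmem
          simp only [List.map_append, List.mem_append, List.map_cons, List.map_nil,
            List.mem_singleton] at hmem
          rcases hmem with h | h
          · exact hdis c' (by simp [hc']) h
          · exact hnotrest (h ▸ hc'))
        (by
          simp only [List.map_append]
          rw [List.nodup_append]
          refine ⟨hpre, by simp, ?_⟩
          intro a ha b hb he
          simp only [List.map_cons, List.map_nil, List.mem_singleton] at hb
          exact hnotpre ((he.trans hb) ▸ ha))
        hrest_nd]
    simp

theorem pvOuterItems (dl : List (List (String × String))) (names : List String)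
    (g : String → List String) (hnd : names.Nodup) :
    (dl.foldl (fun d row => names.foldl (fun d c => pvStep row d c) d)
        (PySem.Dict.mk (names.map (fun c => (c, g c))))).items
      = names.map (fun c => (c, g c ++ pvColF dl c)) := by
  induction dl generalizing g with
  | nil => simp [pvColF]
  | cons row rest ih =>
    have hstep : names.foldl (fun d c => pvStep row d c)
        (PySem.Dict.mk (names.map (fun c => (c, g c))))
        = PySem.Dict.mk (names.map (fun c => (c, g c ++ pvCellList row c))) := by
      apply PySem.Dict.ext
      simpa using pvStepItems row names [] g (by simp) (by simp) hnd
    rw [List.foldl_cons, hstep, ih (fun c => g c ++ pvCellList row c)]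
    simp [pvColF_cons, List.append_assoc]

theorem pvMaxA_eq (l : List Nat) : pvMaxHead l = l.foldl max 0 := by
  rw [pvMaxHead.eq_def]
  cases l with
  | nil => rfl
  | cons x xs => simp [List.foldl_cons]

theorem pvReplicateGetD (k j : Nat) : (List.replicate k ("" : String)).getD j "" = "" := by
  induction k generalizing j with
  | zero => simp
  | succ n ih => cases j <;> simp [List.replicate]

theorem pvPadGetD (l : List String) (m i : Nat) (_hi : i < m) :
    (l ++ List.replicate (m - l.length) "").getD i "" = l.getD i "" := by
  by_cases h : i < l.length
  · rw [List.getD_append _ _ _ _ h]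
  · rw [Nat.not_lt] at h
    rw [List.getD_append_right _ _ _ _ h, pvReplicateGetD,
      List.getD_eq_default _ _ h]

theorem pvMultiZip_eq (n : Nat) (cols : List (List String)) (h : ∀ l ∈ cols, l.length = n) :
    pvMultiZip n cols = (List.range n).map (fun i => cols.map (fun l => l.getD i "")) := by
  induction n generalizing cols with
  | zero => simp [pvMultiZip]
  | succ m ih =>
    rw [pvMultiZip, List.range_succ_eq_map, List.map_cons,
      ih (cols.map List.tail) (by
        intro l hl
        rcases List.mem_map.mp hl with ⟨l', hl', rfl⟩
        have := h l' hl'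
        cases l' with
        | nil => simp at this
        | cons a t => simpa using this)]
    refine List.cons_eq_cons.mpr ⟨?_, ?_⟩
    · apply List.map_congr_left
      intro l hl
      have := h l hl
      cases l with
      | nil => simp at this
      | cons a t => simp
    · rw [List.map_map]
      apply List.map_congr_left
      intro i _
      rw [List.map_map]
      apply List.map_congr_left
      intro l hl
      have := h l hl
      cases l with
      | nil => simp at this
      | cons a t => simp [Nat.succ_eq_add_one]

-- ===== B-side lemmas =====

theorem pvFoldlMax_le (l : List Nat) (a b : Nat) (ha : a ≤ b) (h : ∀ x ∈ l, x ≤ b) :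
    l.foldl max a ≤ b := by
  induction l generalizing a with
  | nil => simpa using ha
  | cons x t ih =>
    exact ih (max a x) (by simp [ha, h x (by simp)]) (fun y hy => h y (by simp [hy]))

theorem pvLen_le_Mx (names : List String) (g : String → List String) (c : String) (hc : c ∈ names) :
    (g c).length ≤ pvMx names g :=
  (PySem.List.le_foldl_max _ 0).2 _ (List.mem_map_of_mem hc)

theorem pvMx_congr (names : List String) (g g' : String → List String)
    (h : ∀ c ∈ names, g c = g' c) : pvMx names g = pvMx names g' := by
  unfold pvMx
  rw [List.map_congr_left (fun c hc => by rw [h c hc])]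

theorem pvRows_congr (names : List String) (g g' : String → List String)
    (h : ∀ c ∈ names, g c = g' c) : pvRows names g = pvRows names g' := by
  unfold pvRows
  rw [pvMx_congr names g g' h]
  exact List.map_congr_left (fun i _ => List.map_congr_left (fun c hc => by rw [h c hc]))

theorem pvCounts_congr (names : List String) (g g' : String → List String)
    (h : ∀ c ∈ names, g c = g' c) : pvCounts names g = pvCounts names g' := by
  unfold pvCounts
  rw [List.map_congr_left (fun c hc => by rw [h c hc])]

theorem pvCounts_getD (names : List String) (g : String → List String) (c : String)
    (hc : c ∈ names) (hnd : names.Nodup) :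
    (pvCounts names g).getD c 0 = (g c).length := by
  unfold pvCounts
  have hm : (c, (g c).length) ∈ (PySem.Dict.mk (names.map (fun c => (c, (g c).length)))).items :=
    List.mem_map_of_mem hc
  refine PySem.Dict.getD_of_mem_items _ hm ?_ 0
  simpa [PySem.Dict.keys, Function.comp_def] using hnd

theorem pvAppGetD (l : List String) (cell : String) (j : Nat) (hj : j ≠ l.length) :
    (l ++ [cell]).getD j "" = l.getD j "" := by
  by_cases h : j < l.length
  · rw [List.getD_append _ _ _ _ h]
  · have h1 : l.length ≤ j := by omega
    have h2 : (l ++ [cell]).length ≤ j := by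
      rw [List.length_append, List.length_singleton]; omega
    rw [List.getD_eq_default _ _ h2, List.getD_eq_default _ _ h1]

-- the single event step preserves the state shape, advancing the history by pvUpd
theorem pvStepB_normal (names : List String) (g : String → List String) (c cell : String)
    (hc : c ∈ names) (hnd : names.Nodup) :
    pvStepB names (pvRows names g, pvCounts names g) c cell
      = (pvRows names (pvUpd g c cell), pvCounts names (pvUpd g c cell)) := by
  by_cases hs : PySem.Str.strip cell = ""
  · have hg : pvUpd g c cell = g := by funext c'; simp [pvUpd, hs]
    simp [pvStepB, hs, hg]
  · have hupd : ∀ c', pvUpd g c cell c' = if c' = c then g c ++ [cell] else g c' := by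
      intro c'; simp [pvUpd, hs]
    have hrowslen : (pvRows names g).length = pvMx names g := by simp [pvRows]
    have hcget : (pvCounts names g).getD c 0 = (g c).length := pvCounts_getD names g c hc hnd
    have hcont : (pvCounts names g).contains c = true := by
      rw [PySem.Dict.contains_eq_decide_mem_keys]
      simp [pvCounts, PySem.Dict.keys, Function.comp_def, hc]
    have hcounts : (pvCounts names g).insert c ((g c).length + 1) = pvCounts names (pvUpd g c cell) := by
      apply PySem.Dict.ext
      rw [PySem.Dict.items_insert_of_contains _ _ hcont]
      simp only [pvCounts, PySem.Dict.items, List.map_map]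
      apply List.map_congr_left
      intro c' _
      by_cases h : c' = c <;> simp [h, hupd, Function.comp_def]
    -- per-index rows of the new history, away from the written index
    have hFrow : ∀ j, j ≠ (g c).length →
        (names.map (fun c' => (c', (pvUpd g c cell c').getD j ""))
          = names.map (fun c' => (c', (g c').getD j ""))) := by
      intro j hj
      apply List.map_congr_left
      intro c' _
      rw [hupd]
      split_ifs with h
      · subst h; rw [pvAppGetD _ _ _ hj]
      · rfl
    -- the written row: overwrite entry c of the old row at index (g c).length
    have hWrow : ∀ r : List (String × String),
        r = names.map (fun c' => (c', (g c').getD (g c).length "")) →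
        ((PySem.Dict.mk r).insert c cell).items
          = names.map (fun c' => (c', (pvUpd g c cell c').getD (g c).length "")) := by
      intro r hr
      subst hr
      have hcont' : (PySem.Dict.mk (names.map (fun c' => (c', (g c').getD (g c).length "")))).contains c = true := by
        rw [PySem.Dict.contains_eq_decide_mem_keys]
        simp [PySem.Dict.keys, Function.comp_def, hc]
      rw [PySem.Dict.items_insert_of_contains _ _ hcont']
      simp only [PySem.Dict.items, List.map_map]
      apply List.map_congr_left
      intro c' _
      by_cases h : c' = c
      · subst h
        simp only [Function.comp_def, beq_self_eq_true, if_pos, hupd, if_pos rfl]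
        rw [List.getD_append_right _ _ _ _ (le_refl _)]
        simp
      · have hb : (c' == c) = false := by simpa using h
        simp [Function.comp_def, hb, hupd, h]
    simp only [pvStepB]
    rw [if_pos hs, hcget, hrowslen]
    by_cases hm : (g c).length = pvMx names g
    · -- a blank row is appended, then written at index pvMx names g
      rw [if_pos hm]
      have hMx' : pvMx names (pvUpd g c cell) = pvMx names g + 1 := by
        apply Nat.le_antisymm
        · refine pvFoldlMax_le _ 0 _ (by omega) ?_
          intro x hx
          rcases List.mem_map.mp hx with ⟨c', hc', rfl⟩
          rw [hupd]
          split_ifs with h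
          · simp; omega
          · have := pvLen_le_Mx names g c' hc'; omega
        · have := pvLen_le_Mx names (pvUpd g c cell) c hc
          rw [hupd, if_pos rfl] at this
          simp at this
          omega
      have hgetrow : ((pvRows names g ++ [pvBlank names]).getD (g c).length []) = pvBlank names := by
        rw [List.getD_append_right _ _ _ _ (by omega), hrowslen]
        simp [hm]
      have hblank : pvBlank names = names.map (fun c' => (c', (g c').getD (g c).length "")) := by
        unfold pvBlank
        apply List.map_congr_left
        intro c' hc'
        have hle : (g c').length ≤ (g c).length := hm ▸ pvLen_le_Mx names g c' hc'
        rw [List.getD_eq_default _ _ hle]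
      refine Prod.ext ?_ (by simpa using hcounts)
      show (pvRows names g ++ [pvBlank names]).set (g c).length
          (((PySem.Dict.mk ((pvRows names g ++ [pvBlank names]).getD (g c).length [])).insert c cell).items)
        = pvRows names (pvUpd g c cell)
      rw [hgetrow, hWrow _ hblank]
      apply List.ext_getElem
      · rw [List.length_set, List.length_append, hrowslen, List.length_singleton]
        simp [pvRows, hMx']
      · intro j h1 h2
        have hjlen : j < pvMx names g + 1 := by
          rw [List.length_set, List.length_append, hrowslen, List.length_singleton] at h1
          omega
        simp only [List.getElem_set]
        simp only [pvRows, List.getElem_map, List.getElem_range]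
        split_ifs with h
        · rw [← h]
        · have hj : j < pvMx names g := by omega
          rw [hFrow j (fun he => h he.symm)]
          rw [List.getElem_append_left (by simpa using hj)]
          simp
    · -- the cell lands in an existing row
      rw [if_neg hm]
      have hlt : (g c).length < pvMx names g :=
        lt_of_le_of_ne (pvLen_le_Mx names g c hc) hm
      have hMx' : pvMx names (pvUpd g c cell) = pvMx names g := by
        apply Nat.le_antisymm
        · refine pvFoldlMax_le _ 0 _ (by omega) ?_
          intro x hx
          rcases List.mem_map.mp hx with ⟨c', hc', rfl⟩
          rw [hupd]
          split_ifs with h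
          · simp; omega
          · exact pvLen_le_Mx names g c' hc'
        · refine pvFoldlMax_le _ 0 _ (by omega) ?_
          intro x hx
          rcases List.mem_map.mp hx with ⟨c', hc', rfl⟩
          exact le_trans (by rw [hupd]; split_ifs with h <;> simp [h]) (pvLen_le_Mx names (pvUpd g c cell) c' hc')
      have hgetrow : (pvRows names g).getD (g c).length []
          = names.map (fun c' => (c', (g c').getD (g c).length "")) := by
        rw [List.getD_eq_getElem _ _ (by rw [hrowslen]; exact hlt)]
        simp [pvRows]
      refine Prod.ext ?_ (by simpa using hcounts)
      show (pvRows names g).set (g c).length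
          (((PySem.Dict.mk ((pvRows names g).getD (g c).length [])).insert c cell).items)
        = pvRows names (pvUpd g c cell)
      rw [hgetrow, hWrow _ rfl]
      apply List.ext_getElem
      · simp [pvRows, hMx']
      · intro j h1 h2
        simp only [List.getElem_set]
        simp only [pvRows, List.getElem_map, List.getElem_range]
        split_ifs with h
        · rw [← h]
        · rw [hFrow j (fun he => h he.symm)]

-- the inner loop over the columns of one row
theorem pvInnerB (names : List String) (hnd : names.Nodup) (row : List (String × String))
    (cs : List String) (hsub : ∀ c ∈ cs, c ∈ names) (g : String → List String) :
    cs.foldl (fun st c => pvStepB names st c (pvCell row c)) (pvRows names g, pvCounts names g)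
      = (pvRows names (cs.foldl (fun g c => pvUpd g c (pvCell row c)) g),
         pvCounts names (cs.foldl (fun g c => pvUpd g c (pvCell row c)) g)) := by
  induction cs generalizing g with
  | nil => rfl
  | cons c t ih =>
    rw [List.foldl_cons, pvStepB_normal names g c (pvCell row c) (hsub c (by simp)) hnd,
      ih (fun c' hc' => hsub c' (by simp [hc'])), List.foldl_cons]

-- the history accumulated by one row's pass
theorem pvGRow_eq (row : List (String × String)) (cs : List String) (hnd : cs.Nodup)
    (g : String → List String) (c' : String) :
    (cs.foldl (fun g c => pvUpd g c (pvCell row c)) g) c'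
      = if c' ∈ cs then g c' ++ pvCellList row c' else g c' := by
  induction cs generalizing g with
  | nil => simp
  | cons c t ih =>
    rw [List.foldl_cons, ih (List.nodup_cons.mp hnd).2]
    by_cases h : c' = c
    · subst h
      rw [if_neg (List.nodup_cons.mp hnd).1, if_pos (by simp)]
      simp [pvUpd, pvCellList]
      split_ifs <;> simp
    · have : pvUpd g c (pvCell row c) c' = g c' := by simp [pvUpd, h]
      rw [this]
      by_cases ht : c' ∈ t <;> simp [ht, h]

-- the outer loop over the rows
theorem pvOuterB (names : List String) (hnd : names.Nodup) (dl : List (List (String × String)))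
    (g : String → List String) :
    dl.foldl (fun st row => names.foldl (fun st c => pvStepB names st c (pvCell row c)) st)
        (pvRows names g, pvCounts names g)
      = (pvRows names (fun c => g c ++ pvColF dl c),
         pvCounts names (fun c => g c ++ pvColF dl c)) := by
  induction dl generalizing g with
  | nil =>
    rw [List.foldl_nil,
      pvRows_congr names g (fun c => g c ++ pvColF [] c) (fun c _ => by simp [pvColF]),
      pvCounts_congr names g (fun c => g c ++ pvColF [] c) (fun c _ => by simp [pvColF])]
  | cons row rest ih =>
    rw [List.foldl_cons, pvInnerB names hnd row names (fun c hc => hc) g,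
      pvRows_congr names _ (fun c => g c ++ pvCellList row c)
        (fun c hc => by rw [pvGRow_eq row names hnd g c, if_pos hc]),
      pvCounts_congr names _ (fun c => g c ++ pvCellList row c)
        (fun c hc => by rw [pvGRow_eq row names hnd g c, if_pos hc]),
      ih (fun c => g c ++ pvCellList row c),
      pvRows_congr names _ (fun c => g c ++ pvColF (row :: rest) c)
        (fun c _ => by simp [pvColF_cons, List.append_assoc]),
      pvCounts_congr names _ (fun c => g c ++ pvColF (row :: rest) c)
        (fun c _ => by simp [pvColF_cons, List.append_assoc])]

-- B's whole run in closed form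
theorem pvAltEq (r0 : List (String × String)) (rest : List (List (String × String)))
    (hnd : (r0.map Prod.fst).Nodup) :
    clean_csv_by_col_dict_alt (r0 :: rest)
      = pvRows (r0.map Prod.fst) (fun c => pvColF (r0 :: rest) c) := by
  have hMx0 : pvMx (r0.map Prod.fst) (fun _ => ([] : List String)) = 0 := by
    apply Nat.le_antisymm _ (Nat.zero_le _)
    refine pvFoldlMax_le _ 0 _ (le_refl _) ?_
    intro x hx
    rcases List.mem_map.mp hx with ⟨c', _, rfl⟩
    simp
  have hrows0 : pvRows (r0.map Prod.fst) (fun _ => ([] : List String)) = [] := by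
    simp [pvRows, hMx0]
  have hcounts0 : (r0.map Prod.fst).foldl (fun d c => d.insert c 0) PySem.Dict.empty
      = pvCounts (r0.map Prod.fst) (fun _ => ([] : List String)) := by
    apply PySem.Dict.ext
    rw [pvInitItems _ _ hnd]
    simp [pvCounts]
  show ((r0 :: rest).foldl
      (fun st row => (r0.map Prod.fst).foldl (fun st c => pvStepB (r0.map Prod.fst) st c (pvCell row c)) st)
      ([], (r0.map Prod.fst).foldl (fun d c => d.insert c 0) PySem.Dict.empty)).1
    = pvRows (r0.map Prod.fst) (fun c => pvColF (r0 :: rest) c)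
  rw [hcounts0, ← hrows0, pvOuterB _ hnd]
  rfl

-- ===== VERDICT (by name: the statement is the Claim_ definition above) =====
theorem clean_csv_by_col_dict_spec : Claim_equal_clean_csv_by_col_dict := by
  intro dl0 _ hpre
  obtain ⟨h1, _h2, h3⟩ := hpre
  unfold Spec_clean_csv_by_col_dict
  cases dl0 with
  | nil => exact absurd rfl h1
  | cons r0 rest =>
    have hnd0 : (r0.map Prod.fst).Nodup := (h3 r0 (by simp)).1
    have hinit : (r0.map Prod.fst).foldl (fun d c => d.insert c ([] : List String)) PySem.Dict.empty
        = PySem.Dict.mk ((r0.map Prod.fst).map (fun c => (c, ([] : List String)))) := by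
      apply PySem.Dict.ext
      simpa using pvInitItems (r0.map Prod.fst) ([] : List String) hnd0
    have hclean : ((r0 :: rest).foldl (fun d row => (r0.map Prod.fst).foldl (fun d c => pvStep row d c) d)
          ((r0.map Prod.fst).foldl (fun d c => d.insert c ([] : List String)) PySem.Dict.empty)).items
        = (r0.map Prod.fst).map (fun c => (c, pvColF (r0 :: rest) c)) := by
      rw [hinit]
      simpa using pvOuterItems (r0 :: rest) (r0.map Prod.fst) (fun _ => []) hnd0
    rw [pvAltEq r0 rest hnd0]
    simp only [clean_csv_by_col_dict, List.headD_cons,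
      PySem.Dict.values, hclean, List.map_map, pvMaxA_eq, Function.comp_def]
    try simp only [← pvColF.eq_def]
    have hlen : ∀ l ∈ r0.map (fun x =>
        pvColF (r0 :: rest) x.1 ++
          List.replicate ((r0.map (fun x => (pvColF (r0 :: rest) x.1).length)).foldl max 0
            - (pvColF (r0 :: rest) x.1).length) ""),
        l.length = (r0.map (fun x => (pvColF (r0 :: rest) x.1).length)).foldl max 0 := by
      intro l hl
      obtain ⟨x, hx, rfl⟩ := List.mem_map.mp hl
      have hle : (pvColF (r0 :: rest) x.1).length
          ≤ (r0.map (fun x => (pvColF (r0 :: rest) x.1).length)).foldl max 0 :=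
        (PySem.List.le_foldl_max _ 0).2 _ (List.mem_map_of_mem hx)
      simp only [List.length_append, List.length_replicate]
      omega
    rw [pvMultiZip_eq _ _ hlen, List.map_map]
    have hMxEq : pvMx (r0.map Prod.fst) (fun c => pvColF (r0 :: rest) c)
        = (r0.map (fun x => (pvColF (r0 :: rest) x.1).length)).foldl max 0 := by
      simp [pvMx, List.map_map, Function.comp_def]
    simp only [pvRows, hMxEq]
    apply List.map_congr_left
    intro i hi
    rw [List.mem_range] at hi
    simp only [Function.comp_def, List.map_map, List.zip_map', pvPadGetD _ _ _ hi]
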